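-- pv_equiv track=rewrite | github.com/dahyun-hey/da_log | Python/programers/05-04_blind.py | solution
-- ===== SOURCE A (Python) =====
-- def solution(s):
--     answer = ""
--     for i in range(len(s)-4):
--             i = "*"
--             answer += str(i)
--     j = s[-4:]
--     answer = str(answer) + j
--     return answer
-- ===== SOURCE B (Python) =====
-- def solution(s):
--     return "*" * (len(s) - 4) + s[-4:]
-- ===== Notes on version B (the rewrite author's own statement) =====
-- stated objective: simpler
-- what changed: Replaces the per-character accumulation loop over range(len(s)-4) with a closed-form expression: string multiplication builds the mask in one step (yielding the empty string for non-positive counts, matching the empty loop) and the last four characters are concatenated once.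
import Mathlib
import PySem

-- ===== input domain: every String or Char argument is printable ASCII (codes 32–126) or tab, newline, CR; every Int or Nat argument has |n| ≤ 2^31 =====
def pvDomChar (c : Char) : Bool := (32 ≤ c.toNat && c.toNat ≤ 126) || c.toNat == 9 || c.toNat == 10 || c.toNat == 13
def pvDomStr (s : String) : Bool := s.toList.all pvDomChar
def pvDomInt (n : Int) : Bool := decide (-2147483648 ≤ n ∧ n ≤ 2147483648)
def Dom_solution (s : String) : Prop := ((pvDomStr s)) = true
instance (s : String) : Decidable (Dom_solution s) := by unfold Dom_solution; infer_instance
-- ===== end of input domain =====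

-- B replaces A's '*'-appending loop with the closed form '*' * (len(s)-4) + s[-4:] (simpler).

-- ===== PORT A =====
-- the loop 'for i in range(len(s)-4): answer += "*"' as a fold over pyRange
def solution (s : String) : String :=
  let answer : List Char :=
    (PySem.List.pyRange 0 ((s.toList.length : Int) - 4) 1).foldl (fun a _ => a ++ ['*']) []
  let j : List Char := PySem.List.slice s.toList (some (-4)) none
  String.ofList (answer ++ j)

-- ===== PORT B =====
def solution_alt (s : String) : String :=
  String.ofList (PySem.List.pyRepeat ['*'] ((s.toList.length : Int) - 4)
    ++ PySem.List.slice s.toList (some (-4)) none)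

-- ===== PRECONDITION & SPEC =====
def Spec_solution (s : String) (out : String) : Prop := out = solution_alt s
instance (s : String) (out : String) : Decidable (Spec_solution s out) := by unfold Spec_solution; infer_instance

-- ===== CLAIM (what is proved, stated in full; the proofs are below) =====
def Claim_equal_solution : Prop := ∀ (s : String), Dom_solution s → Spec_solution s (solution s)

-- ===== LEMMAS AND PROOFS =====

-- A's loop builds acc ++ replicate (length of the range) '*'
theorem foldl_star (l : List Int) (acc : List Char) :
    l.foldl (fun a _ => a ++ ['*']) acc = acc ++ List.replicate l.length '*' := by
  induction l generalizing acc with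
  | nil => simp
  | cons x xs ih =>
      have h : ('*' :: List.replicate xs.length '*') = List.replicate xs.length '*' ++ ['*'] := by
        rw [← List.replicate_succ, List.replicate_succ']
      simp [List.foldl, ih, List.replicate_succ', List.append_assoc, ← h]

-- ===== VERDICT (by name: the statement is the Claim_ definition above) =====
theorem solution_spec : Claim_equal_solution := by
  intro s _
  unfold Spec_solution solution solution_alt
  rw [foldl_star, PySem.List.pyRepeat_singleton, PySem.List.length_pyRange_one]
  simp
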